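-- pv_equiv track=rewrite | github.com/byrn-baker/Nautobot-Workshop | nautobot-docker-compose/jobs/auto_config_interface_dispatcher.py | _slice_interface_block
-- ===== SOURCE A (Python) =====
-- def _slice_interface_block(lines: list[str], ifname: str) -> list[str]:
--     """Return only interface <ifname> block."""
--     try:
--         start = lines.index(f"interface {ifname}")
--     except ValueError:
--         return []
--     end = next(
--         (i for i, l in enumerate(lines[start + 1:], start=start + 1)
--          if l.startswith("interface ") or l.strip() == "!"),
--         len(lines),
--     )
--     return lines[start:end]
-- ===== SOURCE B (Python) =====
-- def _slice_interface_block(lines: list[str], ifname: str) -> list[str]: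
--     """Return only interface <ifname> block."""
--     target = f"interface {ifname}"
--     block: list[str] = []
--     collecting = False
--     for line in lines:
--         if collecting:
--             if line.startswith("interface ") or line.strip() == "!":
--                 break
--             block.append(line)
--         elif line == target:
--             collecting = True
--             block.append(line)
--     return block
-- ===== Notes on version B (the rewrite author's own statement) =====
-- stated objective: simpler
-- what changed: Replaces the index-lookup, enumerate-scan-for-terminator and slice with a single pass over the lines maintaining a collecting flag and a result list.
import Mathlib
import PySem

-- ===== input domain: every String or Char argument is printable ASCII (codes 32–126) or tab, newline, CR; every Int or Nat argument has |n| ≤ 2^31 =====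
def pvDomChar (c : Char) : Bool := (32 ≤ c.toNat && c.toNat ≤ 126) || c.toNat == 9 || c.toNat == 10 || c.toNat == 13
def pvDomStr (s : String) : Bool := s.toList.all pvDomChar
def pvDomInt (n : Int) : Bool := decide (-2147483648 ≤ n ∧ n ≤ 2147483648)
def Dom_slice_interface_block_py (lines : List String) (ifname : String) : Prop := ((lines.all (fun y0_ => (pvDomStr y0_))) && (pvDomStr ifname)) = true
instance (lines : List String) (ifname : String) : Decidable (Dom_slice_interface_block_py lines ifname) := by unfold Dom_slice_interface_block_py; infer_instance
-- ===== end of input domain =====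

-- B replaces A's index-lookup + enumerate-scan + slice with one pass keeping a collecting flag (objective: simpler).


-- the terminator test `l.startswith("interface ") or l.strip() == "!"`, shared verbatim by both Pythons
def pvTerm (l : String) : Bool := PySem.Str.startswith l "interface " || PySem.Str.strip l == "!"

-- ===== PORT A =====
-- `next((i for i, l in enumerate(rest, start=off) if <term>), default)` : first index (counting from off) whose line terminates the block
def pvFindEnd : List String → Nat → Option Nat
  | [], _ => none
  | l :: rest, i => if pvTerm l then some i else pvFindEnd rest (i + 1)

def slice_interface_block_py (lines : List String) (ifname : String) : List String :=
  match PySem.List.index? lines ("interface " ++ ifname) with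
  | none => []            -- except ValueError: return []
  | some start =>
    let stop : Nat := (pvFindEnd (PySem.List.slice lines (some ((start + 1 : Nat) : Int)) none) (start + 1)).getD lines.length
    PySem.List.slice lines (some ((start : Nat) : Int)) (some ((stop : Nat) : Int))

-- ===== PORT B =====
-- the for-loop of Source B: state = the `collecting` flag; break returns the collected prefix
def pvCollect (target : String) : List String → Bool → List String
  | [], _ => []
  | l :: rest, true => if pvTerm l then [] else l :: pvCollect target rest true
  | l :: rest, false => if l == target then l :: pvCollect target rest true else pvCollect target rest false

def slice_interface_block_py_alt (lines : List String) (ifname : String) : List String :=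
  pvCollect ("interface " ++ ifname) lines false

-- ===== PRECONDITION & SPEC =====
def Spec_slice_interface_block_py (lines : List String) (ifname : String) (out : List String) : Prop := out = slice_interface_block_py_alt lines ifname
instance (lines : List String) (ifname : String) (out : List String) : Decidable (Spec_slice_interface_block_py lines ifname out) := by unfold Spec_slice_interface_block_py; infer_instance

-- ===== CLAIM (what is proved, stated in full; the proofs are below) =====
def Claim_equal_slice_interface_block_py : Prop := ∀ (lines : List String) (ifname : String), Dom_slice_interface_block_py lines ifname → Spec_slice_interface_block_py lines ifname (slice_interface_block_py lines ifname)

-- ===== LEMMAS AND PROOFS =====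

theorem pvCollect_not_mem (t : String) (xs : List String) (h : t ∉ xs) :
    pvCollect t xs false = [] := by
  induction xs with
  | nil => rfl
  | cons l rest ih =>
    simp only [List.mem_cons, not_or] at h
    simp [pvCollect, beq_iff_eq, Ne.symm h.1, ih h.2]

theorem pvCollect_true_eq_takeWhile (t : String) (xs : List String) :
    pvCollect t xs true = xs.takeWhile (fun l => !pvTerm l) := by
  induction xs with
  | nil => rfl
  | cons l rest ih =>
    by_cases h : pvTerm l <;> simp [pvCollect, List.takeWhile, h, ih]

theorem pvFindEnd_ge (xs : List String) (off j : Nat) (h : pvFindEnd xs off = some j) :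
    off ≤ j := by
  induction xs generalizing off with
  | nil => simp [pvFindEnd] at h
  | cons l rest ih =>
    rw [pvFindEnd] at h
    by_cases hl : pvTerm l
    · rw [if_pos hl] at h
      injection h with h
      omega
    · rw [if_neg hl] at h
      have := ih (off + 1) h
      omega

theorem pvFindEnd_stop_ge (xs : List String) (off : Nat) :
    off ≤ (pvFindEnd xs off).getD (off + xs.length) := by
  cases h : pvFindEnd xs off with
  | none => simp
  | some j => simpa using pvFindEnd_ge xs off j h

theorem take_pvFindEnd (xs : List String) (off : Nat) :
    xs.take ((pvFindEnd xs off).getD (off + xs.length) - off)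
      = xs.takeWhile (fun l => !pvTerm l) := by
  induction xs generalizing off with
  | nil => simp
  | cons l rest ih =>
    by_cases h : pvTerm l
    · simp [pvFindEnd, h, List.takeWhile]
    · have hge := pvFindEnd_stop_ge rest (off + 1)
      have h1 : pvFindEnd (l :: rest) off = pvFindEnd rest (off + 1) := by
        rw [pvFindEnd, if_neg h]
      have hlen : off + (l :: rest).length = (off + 1) + rest.length := by
        simp; omega
      rw [h1, hlen]
      have hsub : (pvFindEnd rest (off + 1)).getD ((off + 1) + rest.length) - off
          = ((pvFindEnd rest (off + 1)).getD ((off + 1) + rest.length) - (off + 1)) + 1 := by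
        omega
      rw [hsub, List.take_succ_cons, ih (off + 1)]
      simp [h]

theorem pvCollect_skip (t : String) (pre post : List String) (hnm : t ∉ pre) :
    pvCollect t (pre ++ t :: post) false = t :: pvCollect t post true := by
  induction pre with
  | nil => simp [pvCollect]
  | cons p ps ih =>
    simp only [List.mem_cons, not_or] at hnm
    simp only [List.cons_append, pvCollect]
    rw [if_neg (by simp only [beq_iff_eq]; exact fun e => hnm.1 e.symm)]
    exact ih hnm.2

theorem slice_interface_block_py_eq (lines : List String) (ifname : String) :
    slice_interface_block_py lines ifname = slice_interface_block_py_alt lines ifname := by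
  unfold slice_interface_block_py slice_interface_block_py_alt
  cases h : PySem.List.index? lines ("interface " ++ ifname) with
  | none =>
    rw [pvCollect_not_mem _ _ ((PySem.List.index?_eq_none_iff _ _).mp h)]
  | some s =>
    obtain ⟨pre, post, hsplit, hlen, hnm⟩ := (PySem.List.index?_eq_some_iff _ _ _).mp h
    subst hsplit
    set t := "interface " ++ ifname with ht
    simp only [PySem.List.slice_from_natCast]
    have hdrop : (pre ++ t :: post).drop (s + 1) = post := by
      rw [← hlen]
      simp
    have hlenall : (pre ++ t :: post).length = (s + 1) + post.length := by
      simp [← hlen]; omega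
    rw [hdrop, hlenall, PySem.List.slice_natCast]
    have hdrops : (pre ++ t :: post).drop s = t :: post := by
      rw [← hlen]; simp
    rw [hdrops]
    rw [pvCollect_skip t pre post hnm, pvCollect_true_eq_takeWhile]
    have hge := pvFindEnd_stop_ge post (s + 1)
    have hsub : (pvFindEnd post (s + 1)).getD ((s + 1) + post.length) - s
        = ((pvFindEnd post (s + 1)).getD ((s + 1) + post.length) - (s + 1)) + 1 := by omega
    rw [hsub, List.take_succ_cons, take_pvFindEnd post (s + 1)]

-- ===== VERDICT (by name: the statement is the Claim_ definition above) =====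
theorem slice_interface_block_py_spec : Claim_equal_slice_interface_block_py := by
  intro lines ifname _
  exact slice_interface_block_py_eq lines ifname
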